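-- pv_equiv track=rewrite | github.com/Inoquek/ubs-cc2026-flask-app | routes/trader.py | _transform_power_e
-- ===== SOURCE A (Python) =====
-- from typing import Dict, List, Any, Tuple, Optional
--
-- def _find_braced(s: str, i: int) -> Tuple[str, int]:
--     """Given s and index i at '{', return (content, end_index_of_closing_brace)."""
--     assert s[i] == "{"
--     depth = 0; j = i
--     while j < len(s):
--         if s[j] == "{": depth += 1
--         elif s[j] == "}":
--             depth -= 1
--             if depth == 0: return s[i+1:j], j
--         j += 1
--     raise ValueError("Unbalanced braces in LaTeX")
--
-- def _transform_power_e(s: str) -> str: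
--     """Handle e^{...} -> (e**(...)). Other '^' converted later."""
--     out = []; i = 0
--     while i < len(s):
--         if s.startswith("e^{", i):
--             i += 2
--             if i >= len(s) or s[i] != "{": raise ValueError("Malformed e^{...}")
--             inner, j = _find_braced(s, i); i = j + 1
--             out.append(f"(e**({inner}))")
--         else:
--             out.append(s[i]); i += 1
--     return "".join(out)
-- ===== SOURCE B (Python) =====
-- def _transform_power_e(s: str) -> str:
--     """Handle e^{...} -> (e**(...)). Other '^' converted later."""
--     out = []
--     inside = False
--     depth = 0
--     i = 0
--     n = len(s)
--     while i < n:
--         c = s[i]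
--         if not inside:
--             if s.startswith("e^{", i):
--                 out.append("(e**(")
--                 inside = True
--                 depth = 1
--                 i += 3
--                 continue
--             out.append(c)
--         else:
--             if c == "{":
--                 depth += 1
--                 out.append(c)
--             elif c == "}":
--                 depth -= 1
--                 if depth == 0:
--                     out.append("))")
--                     inside = False
--                 else:
--                     out.append(c)
--             else:
--                 out.append(c)
--         i += 1
--     if inside:
--         raise ValueError("Unbalanced braces in LaTeX")
--     return "".join(out)
-- ===== Notes on version B (the rewrite author's own statement) =====
-- stated objective: simpler
-- what changed: Replaced A's two-function design (index loop plus a _find_braced helper that re-scans and slices out the braced content) by a single character-level state machine with an inside flag and a depth counter that emits the output char by char, with no helper, no index jumping and no slicing.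
import Mathlib
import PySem

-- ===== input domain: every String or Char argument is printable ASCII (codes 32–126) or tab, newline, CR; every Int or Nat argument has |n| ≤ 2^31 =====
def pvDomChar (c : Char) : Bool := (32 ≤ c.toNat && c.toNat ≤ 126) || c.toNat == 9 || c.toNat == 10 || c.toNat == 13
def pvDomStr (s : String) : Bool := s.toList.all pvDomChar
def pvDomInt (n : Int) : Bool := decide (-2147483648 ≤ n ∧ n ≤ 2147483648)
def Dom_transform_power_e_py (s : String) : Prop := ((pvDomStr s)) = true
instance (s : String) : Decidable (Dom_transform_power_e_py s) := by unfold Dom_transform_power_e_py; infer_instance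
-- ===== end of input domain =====

-- B replaces A's two-function index/slice scanner by a single-pass inside-flag + depth state
-- machine emitting output character by character (same cost; a different decomposition).

-- ===== PORT A =====
-- _find_braced's while loop: j scans from i with depth : Int; returns (s[i+1:j], j) at the
-- closing brace, none = the final 'raise ValueError("Unbalanced braces in LaTeX")'.
def pvFindLoop (s : List Char) (i j : Nat) (depth : Int) : Option (List Char × Nat) :=
  if h : j < s.length then
    if s[j] = '{' then pvFindLoop s i (j+1) (depth+1)
    else if s[j] = '}' then
      if depth - 1 = 0 then
        some (PySem.List.slice s (some ((i+1 : Nat) : Int)) (some ((j : Nat) : Int)), j)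
      else pvFindLoop s i (j+1) (depth - 1)
    else pvFindLoop s i (j+1) depth
  else none
  termination_by s.length - j
  decreasing_by all_goals exact Nat.sub_succ_lt_self s.length j h

-- the main while loop of _transform_power_e: out is the list of appended strings, joined
-- ("".join) on normal exit; none = a raise.  s.startswith("e^{", i) is transliterated as
-- (s.drop i).take 3 = "e^{"'s chars (exact for a Nat offset).  fuel is pure bookkeeping for
-- structural recursion: the loop runs at most s.length + 1 times, so fuel never reaches 0.
def pvALoop : List Char → Nat → Nat → List (List Char) → Option (List Char)
  | _, 0, _, _ => none
  | s, fuel + 1, i, out =>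
    if h : i < s.length then
      if (s.drop i).take 3 = ['e', '^', '{'] then
        -- i += 2; 'Malformed e^{...}' check; _find_braced(s, i); i = j + 1
        if h2 : i + 2 < s.length then
          if s[i+2] = '{' then
            match pvFindLoop s (i+2) (i+2) 0 with
            | none => none
            | some (inner, j) =>
              pvALoop s fuel (j+1) (out ++ [['(', 'e', '*', '*', '('] ++ inner ++ [')', ')']])
          else none
        else none
      else pvALoop s fuel (i+1) (out ++ [[s[i]]])
    else some out.flatten

def transform_power_e_py (s : String) : String :=
  match pvALoop s.toList (s.toList.length + 1) 0 [] with
  | some cs => String.ofList cs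
  | none => ""   -- unreachable under Pre_ (Python raises ValueError there)

-- ===== PORT B =====
-- single state machine: inside flag + depth, output built char by char; none = the raise.
def pvBLoop (l : List Char) (inside : Bool) (depth : Int) : Option (List Char) :=
  match l with
  | [] => if inside then none else some []
  | c :: r =>
    if inside then
      if c = '{' then (pvBLoop r true (depth + 1)).map (c :: ·)
      else if c = '}' then
        if depth - 1 = 0 then (pvBLoop r false (depth - 1)).map (fun o => ')' :: ')' :: o)
        else (pvBLoop r true (depth - 1)).map (c :: ·)
      else (pvBLoop r true depth).map (c :: ·)
    else
      if (c :: r).take 3 = ['e', '^', '{'] then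
        (pvBLoop ((c :: r).drop 3) true 1).map (fun o => '(' :: 'e' :: '*' :: '*' :: '(' :: o)
      else (pvBLoop r false depth).map (c :: ·)
  termination_by l.length
  decreasing_by all_goals first
    | exact Nat.lt_succ_self _
    | (rw [List.length_drop]; exact Nat.sub_lt (Nat.succ_pos _) (by decide))

def transform_power_e_py_alt (s : String) : String :=
  match pvBLoop s.toList false 0 with
  | some cs => String.ofList cs
  | none => ""

-- ===== PRECONDITION & SPEC =====
-- Pre_ excludes exactly the inputs on which Python A raises ValueError (unbalanced braces):
-- strings containing a power-of-e opener whose brace group never closes; B raises the same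
-- ValueError with the same message there.
def Pre_transform_power_e_py (s : String) : Prop :=
  ∀ i, i < s.toList.length → (s.toList.drop i).take 3 = ['e', '^', '{'] →
    ∃ k, k ≤ (s.toList.drop (i+3)).length ∧
      ((s.toList.drop (i+3)).take k).count '{' < ((s.toList.drop (i+3)).take k).count '}'
instance (s : String) : Decidable (Pre_transform_power_e_py s) := by
  unfold Pre_transform_power_e_py; infer_instance

def pvWitness_transform_power_e_py : String := "e^{x+1} + e^{a^{b}}"

def Spec_transform_power_e_py (s : String) (out : String) : Prop := out = transform_power_e_py_alt s
instance (s : String) (out : String) : Decidable (Spec_transform_power_e_py s out) := by unfold Spec_transform_power_e_py; infer_instance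

-- ===== CLAIM (what is proved, stated in full; the proofs are below) =====
def Claim_equal_transform_power_e_py : Prop := ∀ (s : String), Dom_transform_power_e_py s → Pre_transform_power_e_py s → Spec_transform_power_e_py s (transform_power_e_py s)

-- ===== LEMMAS AND PROOFS =====

-- proof-side reference for B's inside mode: scan to the brace that brings depth back to 0,
-- returning (chars copied before it, rest after it).
def pvBIn (l : List Char) (d : Int) : Option (List Char × List Char) :=
  match l with
  | [] => none
  | c :: r =>
    if c = '{' then (pvBIn r (d + 1)).map (fun p => (c :: p.1, p.2))
    else if c = '}' then
      if d - 1 = 0 then some ([], r)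
      else (pvBIn r (d - 1)).map (fun p => (c :: p.1, p.2))
    else (pvBIn r d).map (fun p => (c :: p.1, p.2))

theorem pvBIn_split (l : List Char) (d : Int) (p : List Char × List Char)
    (h : pvBIn l d = some p) : l = p.1 ++ '}' :: p.2 := by
  induction l generalizing d p with
  | nil => simp [pvBIn] at h
  | cons c r ih =>
    by_cases hc : c = '{'
    · rw [pvBIn, if_pos hc] at h
      cases hq : pvBIn r (d+1) with
      | none => rw [hq] at h; simp at h
      | some q =>
        rw [hq] at h; simp at h
        have := ih (d+1) q hq
        cases h; simp [this, hc]
    · by_cases hc2 : c = '}'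
      · rw [pvBIn, if_neg hc, if_pos hc2] at h
        by_cases hd : d - 1 = 0
        · rw [if_pos hd] at h; cases h; simp [hc2]
        · rw [if_neg hd] at h
          cases hq : pvBIn r (d-1) with
          | none => rw [hq] at h; simp at h
          | some q =>
            rw [hq] at h; simp at h
            have := ih (d-1) q hq
            cases h; simp [this, hc2]
      · rw [pvBIn, if_neg hc, if_neg hc2] at h
        cases hq : pvBIn r d with
        | none => rw [hq] at h; simp at h
        | some q =>
          rw [hq] at h; simp at h
          have := ih d q hq
          cases h; simp [this]

-- B's inside mode factored through pvBIn
theorem pvBLoop_inside (l : List Char) (d : Int) :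
    pvBLoop l true d =
      match pvBIn l d with
      | none => none
      | some p => (pvBLoop p.2 false 0).map (fun o => p.1 ++ ')' :: ')' :: o) := by
  induction l generalizing d with
  | nil => simp [pvBLoop, pvBIn]
  | cons c r ih =>
    by_cases hc : c = '{'
    · rw [pvBLoop, if_pos rfl, if_pos hc, pvBIn, if_pos hc, ih (d+1)]
      cases hq : pvBIn r (d+1) with
      | none => simp
      | some q => simp [Option.map_map]; rfl
    · by_cases hc2 : c = '}'
      · by_cases hd : d - 1 = 0
        · rw [pvBLoop, if_pos rfl, if_neg hc, if_pos hc2, if_pos hd,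
            pvBIn, if_neg hc, if_pos hc2, if_pos hd, hd]
          simp
        · rw [pvBLoop, if_pos rfl, if_neg hc, if_pos hc2, if_neg hd,
            pvBIn, if_neg hc, if_pos hc2, if_neg hd, ih (d-1)]
          cases hq : pvBIn r (d-1) with
          | none => simp
          | some q => simp [Option.map_map]; rfl
      · rw [pvBLoop, if_pos rfl, if_neg hc, if_neg hc2, pvBIn, if_neg hc, if_neg hc2, ih d]
        cases hq : pvBIn r d with
        | none => simp
        | some q => simp [Option.map_map]; rfl

-- unfolding lemmas for B's outside mode
theorem pvBLoop_estart (t : List Char) :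
    pvBLoop ('e' :: '^' :: '{' :: t) false 0 =
      (pvBLoop t true 1).map (fun o => '(' :: 'e' :: '*' :: '*' :: '(' :: o) := by
  rw [pvBLoop]; norm_num

theorem pvBLoop_cons (c : Char) (r : List Char) (d : Int)
    (hne : (c :: r).take 3 ≠ ['e', '^', '{']) :
    pvBLoop (c :: r) false d = (pvBLoop r false d).map (c :: ·) := by
  rw [pvBLoop, if_neg Bool.false_ne_true, if_neg hne]

-- A's _find_braced loop factored through pvBIn
theorem pvFindLoop_eq_pvBIn (s : List Char) (i : Nat) (j : Nat) (d : Int) (hj : j ≤ s.length) :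
    pvFindLoop s i j d =
      match pvBIn (s.drop j) d with
      | none => none
      | some p => some (PySem.List.slice s (some ((i+1 : Nat) : Int))
          (some ((s.length - p.2.length - 1 : Nat) : Int)), s.length - p.2.length - 1) := by
  induction j, d using pvFindLoop.induct (s := s) with
  | case1 j d h1 h2 ih =>
    have hdrop : s[j] :: s.drop (j+1) = s.drop j := List.getElem_cons_drop h1
    rw [pvFindLoop, dif_pos h1, if_pos h2, ih (by omega), ← hdrop, h2, pvBIn, if_pos rfl]
    cases hq : pvBIn (s.drop (j+1)) (d+1) with
    | none => simp
    | some q => simp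
  | case2 j d h1 h2 h3 h4 =>
    have hdrop : s[j] :: s.drop (j+1) = s.drop j := List.getElem_cons_drop h1
    rw [pvFindLoop, dif_pos h1, if_neg h2, if_pos h3, if_pos h4, ← hdrop, h3,
      pvBIn, if_neg (by decide), if_pos rfl, if_pos h4]
    have hl : s.length - (s.length - (j + 1)) - 1 = j := by omega
    simp [hl]
  | case3 j d h1 h2 h3 h4 ih =>
    have hdrop : s[j] :: s.drop (j+1) = s.drop j := List.getElem_cons_drop h1
    rw [pvFindLoop, dif_pos h1, if_neg h2, if_pos h3, if_neg h4, ih (by omega), ← hdrop, h3,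
      pvBIn, if_neg (by decide), if_pos rfl, if_neg h4]
    cases hq : pvBIn (s.drop (j+1)) (d-1) with
    | none => simp
    | some q => simp
  | case4 j d h1 h2 h3 ih =>
    have hdrop : s[j] :: s.drop (j+1) = s.drop j := List.getElem_cons_drop h1
    rw [pvFindLoop, dif_pos h1, if_neg h2, if_neg h3, ih (by omega), ← hdrop,
      pvBIn, if_neg h2, if_neg h3]
    cases hq : pvBIn (s.drop (j+1)) d with
    | none => simp
    | some q => simp
  | case5 j d h1 =>
    have : s.drop j = [] := List.drop_eq_nil_of_le (by omega)
    rw [pvFindLoop, dif_neg h1, this, pvBIn]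

-- main loop correspondence: A's index loop vs B's state machine on the remaining suffix
theorem pvALoop_eq (s : List Char) : ∀ (fuel i : Nat) (out : List (List Char)),
    s.length - i < fuel →
    pvALoop s fuel i out = (pvBLoop (s.drop i) false 0).map (fun r => out.flatten ++ r) := by
  intro fuel
  induction fuel with
  | zero => intro i out hfu; omega
  | succ fuel ih =>
    intro i out hfu
    by_cases h1 : i < s.length
    · by_cases hs : (s.drop i).take 3 = ['e', '^', '{']
      · -- the transforming branch
        have hsplit : s.drop i = ['e', '^', '{'] ++ s.drop (i+3) := by
          conv_lhs => rw [← List.take_append_drop 3 (s.drop i)]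
          rw [hs, List.drop_drop]
        have hlen3 : i + 3 ≤ s.length := by
          have := congrArg List.length hs
          simp at this; omega
        have h2 : i + 2 < s.length := by omega
        have h3 : s[i+2] = '{' := by
          have h4 : s[i+2]? = some '{' := by
            rw [← List.getElem?_drop, hsplit]; rfl
          have h5 := List.getElem?_eq_getElem (l := s) (i := i+2) h2
          rw [h5] at h4; exact Option.some.inj h4
        have hfl : pvFindLoop s (i+2) (i+2) 0 = pvFindLoop s (i+2) (i+3) 1 := by
          rw [pvFindLoop, dif_pos h2, if_pos h3]; norm_num
        have hfind0 : pvFindLoop s (i+2) (i+2) 0 =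
            (match pvBIn (s.drop (i+3)) 1 with
             | none => none
             | some p => some (PySem.List.slice s (some ((i+2+1 : Nat) : Int))
                 (some ((s.length - p.2.length - 1 : Nat) : Int)), s.length - p.2.length - 1)) := by
          rw [hfl, pvFindLoop_eq_pvBIn s (i+2) (i+3) 1 hlen3]
        rw [pvALoop, dif_pos h1, if_pos hs, dif_pos h2, if_pos h3]
        split
        · rename_i heq
          -- _find_braced raises: both sides are none
          rw [hfind0] at heq
          cases hq : pvBIn (s.drop (i+3)) 1 with
          | none =>
            rw [hsplit]
            simp only [List.cons_append, List.nil_append]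
            rw [pvBLoop_estart, pvBLoop_inside, hq]
            simp
          | some p => rw [hq] at heq; simp at heq
        · rename_i inner j heq
          rw [hfind0] at heq
          cases hq : pvBIn (s.drop (i+3)) 1 with
          | none => rw [hq] at heq; simp at heq
          | some p =>
            rw [hq] at heq
            simp only [Option.some.injEq, Prod.mk.injEq] at heq
            obtain ⟨he1, he2⟩ := heq
            have hsp := pvBIn_split _ _ _ hq
            have hplen : s.length - (i+3) = p.1.length + 1 + p.2.length := by
              have := congrArg List.length hsp
              simp at this; omega
            have hjf : s.length - p.2.length - 1 = i + 3 + p.1.length := by omega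
            have hinner : inner = p.1 := by
              rw [← he1, PySem.List.slice_natCast, hjf]
              rw [show i + 2 + 1 = i + 3 by omega]
              rw [show i + 3 + p.1.length - (i + 3) = p.1.length by omega, hsp, List.take_left]
            have hrest : s.drop (j+1) = p.2 := by
              have e1 : s.drop (j+1) = (s.drop (i+3)).drop (p.1.length + 1) := by
                rw [List.drop_drop]; congr 1; omega
              rw [e1, hsp, show p.1 ++ '}' :: p.2 = (p.1 ++ ['}']) ++ p.2 by simp,
                show p.1.length + 1 = (p.1 ++ ['}']).length by simp, List.drop_left]
            rw [ih _ _ (by omega), hrest, hinner]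
            rw [hsplit]
            simp only [List.cons_append, List.nil_append]
            rw [pvBLoop_estart, pvBLoop_inside, hq]
            cases hb : pvBLoop p.2 false 0 with
            | none => simp [hb]
            | some rr => simp [hb]
      · -- plain character copy
        have hdrop : s[i] :: s.drop (i+1) = s.drop i := List.getElem_cons_drop h1
        rw [pvALoop, dif_pos h1, if_neg hs, ih _ _ (by omega), ← hdrop,
          pvBLoop_cons _ _ _ (by rw [hdrop]; exact hs)]
        cases hb : pvBLoop (s.drop (i+1)) false 0 with
        | none => simp
        | some r => simp
    · -- loop exit: join the collected pieces
      have hnil : s.drop i = [] := List.drop_eq_nil_of_le (by omega)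
      rw [pvALoop, dif_neg h1, hnil, pvBLoop]
      simp

-- ===== VERDICT (by name: the statement is the Claim_ definition above) =====
theorem transform_power_e_py_spec : Claim_equal_transform_power_e_py := by
  intro s _ _
  unfold Spec_transform_power_e_py transform_power_e_py transform_power_e_py_alt
  rw [pvALoop_eq s.toList (s.toList.length + 1) 0 [] (by omega)]
  cases h : pvBLoop s.toList false 0 <;> simp [h]
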